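-- pv_equiv track=rewrite | github.com/TomDom80/zadanie_testowe_python | task.py | youngest_oldest_disk
-- ===== SOURCE A (Python) =====
-- def youngest_oldest_disk(data_list):
--     youngest = None
--     oldest = None
--     for x in data_list:
--         if not youngest or x['disk_age'] < youngest['disk_age']:
--             youngest = x
--         if not oldest or x['disk_age'] > oldest['disk_age']:
--             oldest = x
--     return {'youngest': youngest, 'oldest': oldest}
-- ===== SOURCE B (Python) =====
-- def youngest_oldest_disk(data_list):
--     # Divide-and-conquer tournament: recursively split the list in halves,
--     # compute (youngest, oldest) of each half, and merge the two pairs.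
--     def rec(xs):
--         if len(xs) == 1:
--             x = xs[0]
--             return (x, x)
--         mid = len(xs) // 2
--         ly, lo = rec(xs[:mid])
--         ry, ro = rec(xs[mid:])
--         y = ly if ly['disk_age'] <= ry['disk_age'] else ry
--         o = ro if ro['disk_age'] > lo['disk_age'] else lo
--         return (y, o)
--
--     if not data_list:
--         return {'youngest': None, 'oldest': None}
--     y, o = rec(data_list)
--     return {'youngest': y, 'oldest': o}
-- ===== Notes on version B (the rewrite author's own statement) =====
-- stated objective: alternative
-- what changed: A's single fused accumulator loop is replaced by a divide-and-conquer tournament: the list is recursively halved, each half yields its (youngest, oldest) pair, and pairs are merged with tie-breaking toward the earlier half.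
-- outside the precondition, e.g. on youngest_oldest_disk([{}, {'': 0}]): A returns {'youngest': {'': 0}, 'oldest': {'': 0}}, B raises KeyError
import Mathlib
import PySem

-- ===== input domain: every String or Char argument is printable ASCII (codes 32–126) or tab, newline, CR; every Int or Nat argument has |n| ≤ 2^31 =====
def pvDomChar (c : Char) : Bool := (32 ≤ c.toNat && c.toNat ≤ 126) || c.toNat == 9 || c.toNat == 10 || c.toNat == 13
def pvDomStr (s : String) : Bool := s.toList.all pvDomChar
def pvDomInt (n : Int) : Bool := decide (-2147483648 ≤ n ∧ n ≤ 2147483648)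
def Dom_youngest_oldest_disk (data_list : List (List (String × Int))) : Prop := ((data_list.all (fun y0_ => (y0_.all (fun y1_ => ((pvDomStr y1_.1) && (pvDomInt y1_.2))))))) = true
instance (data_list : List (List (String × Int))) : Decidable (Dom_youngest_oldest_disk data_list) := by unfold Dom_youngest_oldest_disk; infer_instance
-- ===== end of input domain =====

-- B replaces A's fused accumulator loop by a divide-and-conquer tournament (recursive halving with pair merges); return-value equivalence on lists of length ≤ 1 or whose dicts all carry 'disk_age'.

-- ===== PORT A =====
-- first match on the association list (exact for Python dict lookup under the type convention);
-- keys compared as char lists so the kernel can evaluate it (Lean's String equality is kernel-opaque)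
def pvLookup (x : List (String × Int)) : Option Int :=
  match x with
  | [] => none
  | (k, v) :: t => if k.toList = "disk_age".toList then some v else pvLookup t

-- x['disk_age']: exact wherever the lookup succeeds (the default is never compared inside Pre_)
def pvAge (x : List (String × Int)) : Int := (pvLookup x).getD 0

-- Python truthiness of the 'youngest'/'oldest' variable: None and the empty dict are falsy
def pvTruthy (s : Option (List (String × Int))) : Bool :=
  match s with
  | none => false
  | some d => !d.isEmpty

def youngest_oldest_disk (data_list : List (List (String × Int))) : List (String × Option (List (String × Int))) :=
  let s := data_list.foldl
    (fun (s : Option (List (String × Int)) × Option (List (String × Int))) x =>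
      let y := if !pvTruthy s.1 || decide (pvAge x < pvAge (s.1.getD [])) then some x else s.1
      let o := if !pvTruthy s.2 || decide (pvAge x > pvAge (s.2.getD [])) then some x else s.2
      (y, o))
    (none, none)
  [("youngest", s.1), ("oldest", s.2)]

-- ===== PORT B =====
-- B's rec: divide-and-conquer on a nonempty slice. The extra Nat argument is only a structural-recursion fuel
-- (always called with fuel = length, which suffices); the [] and fuel-0 cases are unreachable from pvRec
-- (Python's rec is only called on nonempty slices).
def pvRecGo : Nat → List (List (String × Int)) → (List (String × Int)) × (List (String × Int))
  | _, [] => ([], [])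
  | _, [x] => (x, x)
  | 0, _ => ([], [])
  | Nat.succ n, a :: b :: t =>
    let xs := a :: b :: t
    let mid := xs.length / 2
    let l := pvRecGo n (xs.take mid)
    let r := pvRecGo n (xs.drop mid)
    ((if pvAge l.1 ≤ pvAge r.1 then l.1 else r.1),
     (if pvAge l.2 < pvAge r.2 then r.2 else l.2))

def pvRec (xs : List (List (String × Int))) : (List (String × Int)) × (List (String × Int)) :=
  pvRecGo xs.length xs

def youngest_oldest_disk_alt (data_list : List (List (String × Int))) : List (String × Option (List (String × Int))) :=
  match data_list with
  | [] => [("youngest", none), ("oldest", none)]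
  | _ :: _ =>
    let p := pvRec data_list
    [("youngest", some p.1), ("oldest", some p.2)]

-- ===== PRECONDITION & SPEC =====
-- Pre_ excludes lists of length ≥ 2 with an element lacking the 'disk_age' key: there A usually raises KeyError, but on a few
-- shapes (a falsy empty-dict prefix) its dict-falsiness short-circuit still returns a value, while B's tournament merge
-- raises KeyError.
def Pre_youngest_oldest_disk (data_list : List (List (String × Int))) : Prop :=
  data_list.length ≤ 1 ∨ ∀ x ∈ data_list, "disk_age".toList ∈ x.map (fun p => p.1.toList)
instance (data_list : List (List (String × Int))) : Decidable (Pre_youngest_oldest_disk data_list) := by unfold Pre_youngest_oldest_disk; infer_instance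

def pvWitness_youngest_oldest_disk : (List (List (String × Int))) := [[("disk_age", 3)], [("disk_age", 1), ("x", 7)]]

def Spec_youngest_oldest_disk (data_list : List (List (String × Int))) (out : List (String × Option (List (String × Int)))) : Prop := out = youngest_oldest_disk_alt data_list
instance (data_list : List (List (String × Int))) (out : List (String × Option (List (String × Int)))) : Decidable (Spec_youngest_oldest_disk data_list out) := by unfold Spec_youngest_oldest_disk; infer_instance

-- ===== CLAIM (what is proved, stated in full; the proofs are below) =====
def Claim_equal_youngest_oldest_disk : Prop := ∀ (data_list : List (List (String × Int))), Dom_youngest_oldest_disk data_list → Pre_youngest_oldest_disk data_list → Spec_youngest_oldest_disk data_list (youngest_oldest_disk data_list)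

-- ===== LEMMAS AND PROOFS =====

-- functional characterisation used on both sides: first-minimal / first-maximal element of m :: b
def pvMinE (m : List (String × Int)) (b : List (List (String × Int))) : List (String × Int) :=
  b.foldl (fun m x => if pvAge x < pvAge m then x else m) m
def pvMaxE (m : List (String × Int)) (b : List (List (String × Int))) : List (String × Int) :=
  b.foldl (fun m x => if pvAge m < pvAge x then x else m) m

-- a dict whose key list contains "disk_age" has a successful lookup
theorem pvLookup_isSome_of_mem (x : List (String × Int))
    (h : "disk_age".toList ∈ x.map (fun p => p.1.toList)) : (pvLookup x).isSome = true := by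
  induction x with
  | nil => simp at h
  | cons p t ih =>
    simp only [List.map_cons, List.mem_cons] at h
    rw [pvLookup]
    split_ifs with hk
    · simp
    · rcases h with h | h
      · exact absurd h.symm hk
      · exact ih h

-- a state reached by A's loop on a fully keyed list: None, or a dict with a successful lookup (hence nonempty/truthy)
def pvKeyed (s : Option (List (String × Int))) : Prop :=
  match s with
  | none => True
  | some d => (pvLookup d).isSome = true

theorem pvTruthy_of_keyed (d : List (String × Int)) (h : (pvLookup d).isSome = true) :
    pvTruthy (some d) = true := by
  cases d with
  | nil => simp [pvLookup] at h
  | cons p t => simp [pvTruthy]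

-- A's fused loop over a fully keyed list equals the pair of option-valued min/max folds
theorem pvLoop_eq (l : List (List (String × Int))) :
    ∀ (y o : Option (List (String × Int))),
      (∀ x ∈ l, (pvLookup x).isSome = true) → pvKeyed y → pvKeyed o →
      l.foldl
        (fun (s : Option (List (String × Int)) × Option (List (String × Int))) x =>
          let y := if !pvTruthy s.1 || decide (pvAge x < pvAge (s.1.getD [])) then some x else s.1
          let o := if !pvTruthy s.2 || decide (pvAge x > pvAge (s.2.getD [])) then some x else s.2
          (y, o))
        (y, o)
      = (l.foldl (fun acc x => match acc with
            | none => some x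
            | some m => if pvAge x < pvAge m then some x else some m) y,
         l.foldl (fun acc x => match acc with
            | none => some x
            | some m => if pvAge m < pvAge x then some x else some m) o) := by
  induction l with
  | nil => intro y o _ _ _; rfl
  | cons x t ih =>
    intro y o hall hy ho
    have hx : (pvLookup x).isSome = true := hall x (by simp)
    have hall' : ∀ z ∈ t, (pvLookup z).isSome = true := fun z hz => hall z (by simp [hz])
    simp only [List.foldl_cons]
    have step : ∀ (s : Option (List (String × Int))) (cmp : Int → Int → Prop) [DecidableRel cmp], pvKeyed s →
        (if !pvTruthy s || decide (cmp (pvAge x) (pvAge (s.getD []))) then some x else s)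
        = (match s with | none => some x | some m => if cmp (pvAge x) (pvAge m) then some x else some m)
        ∧ pvKeyed (match s with | none => some x | some m => if cmp (pvAge x) (pvAge m) then some x else some m) := by
      intro s cmp _ hs
      cases s with
      | none => exact ⟨by simp [pvTruthy], hx⟩
      | some m =>
        have ht := pvTruthy_of_keyed m hs
        refine ⟨by simp [ht], ?_⟩
        by_cases hc : cmp (pvAge x) (pvAge m)
        · simp [hc, pvKeyed, hx]
        · simpa [hc, pvKeyed] using hs
    obtain ⟨ey, ky⟩ := step y (fun a b => a < b) hy
    obtain ⟨eo, ko⟩ := step o (fun a b => a > b) ho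
    rw [ey, eo] at *
    have := ih _ _ hall' ky ko
    simpa [gt_iff_lt] using this

-- bridge: the option-valued folds starting from `some m` compute pvMinE / pvMaxE
theorem optFold_min (t : List (List (String × Int))) : ∀ m,
    t.foldl (fun acc x => match acc with
        | none => some x
        | some m => if pvAge x < pvAge m then some x else some m) (some m) = some (pvMinE m t) := by
  induction t with
  | nil => intro m; rfl
  | cons x s ih =>
    intro m
    simp only [List.foldl_cons, pvMinE] at *
    by_cases h : pvAge x < pvAge m <;> simp [h, ih]

theorem optFold_max (t : List (List (String × Int))) : ∀ m,
    t.foldl (fun acc x => match acc with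
        | none => some x
        | some m => if pvAge m < pvAge x then some x else some m) (some m) = some (pvMaxE m t) := by
  induction t with
  | nil => intro m; rfl
  | cons x s ih =>
    intro m
    simp only [List.foldl_cons, pvMaxE] at *
    by_cases h : pvAge m < pvAge x <;> simp [h, ih]

-- merging lemmas: folding a nonempty block into an accumulator compares only against the block's own extremum
theorem pvMinE_cons_merge (s : List (List (String × Int))) : ∀ m y,
    pvMinE m (y :: s) = if pvAge (pvMinE y s) < pvAge m then pvMinE y s else m := by
  induction s with
  | nil => intro m y; simp [pvMinE]
  | cons z s' ih =>
    intro m y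
    have h1 : pvMinE m (y :: z :: s') = pvMinE (if pvAge y < pvAge m then y else m) (z :: s') := by
      simp [pvMinE]
    have h2 : pvMinE y (z :: s') = if pvAge (pvMinE z s') < pvAge y then pvMinE z s' else y := ih y z
    rw [h1, ih, h2]
    split_ifs <;> first | rfl | omega
  
theorem pvMaxE_cons_merge (s : List (List (String × Int))) : ∀ m y,
    pvMaxE m (y :: s) = if pvAge m < pvAge (pvMaxE y s) then pvMaxE y s else m := by
  induction s with
  | nil => intro m y; simp [pvMaxE]
  | cons z s' ih =>
    intro m y
    have h1 : pvMaxE m (y :: z :: s') = pvMaxE (if pvAge m < pvAge y then y else m) (z :: s') := by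
      simp [pvMaxE]
    have h2 : pvMaxE y (z :: s') = if pvAge y < pvAge (pvMaxE z s') then pvMaxE z s' else y := ih y z
    rw [h1, ih, h2]
    split_ifs <;> first | rfl | omega

theorem pvMinE_append (m : List (String × Int)) (a b : List (List (String × Int))) :
    pvMinE m (a ++ b) = pvMinE (pvMinE m a) b := by
  simp [pvMinE, List.foldl_append]

theorem pvMaxE_append (m : List (String × Int)) (a b : List (List (String × Int))) :
    pvMaxE m (a ++ b) = pvMaxE (pvMaxE m a) b := by
  simp [pvMaxE, List.foldl_append]

-- the tournament computes the first-minimal and first-maximal element of h :: t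
theorem pvRecGo_eq (n : Nat) : ∀ (h : List (String × Int)) (t : List (List (String × Int))),
    (h :: t).length ≤ n + 1 → pvRecGo n (h :: t) = (pvMinE h t, pvMaxE h t) := by
  induction n with
  | zero =>
    intro h t hle
    match t with
    | [] => simp [pvRecGo, pvMinE, pvMaxE]
    | b :: t' => simp at hle
  | succ n ih =>
    intro h t hle
    match t with
    | [] => simp [pvRecGo, pvMinE, pvMaxE]
    | b :: t' =>
      rw [pvRecGo]
      obtain ⟨k, hk⟩ : ∃ k, (h :: b :: t').length / 2 = k + 1 := ⟨(h :: b :: t').length / 2 - 1, by simp; omega⟩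
      have htake : (h :: b :: t').take ((h :: b :: t').length / 2) = h :: (b :: t').take k := by
        rw [hk]; simp
      obtain ⟨h2, t2, hdrop⟩ : ∃ h2 t2, (h :: b :: t').drop ((h :: b :: t').length / 2) = h2 :: t2 := by
        match hd : (h :: b :: t').drop ((h :: b :: t').length / 2) with
        | [] =>
          have := congrArg List.length hd
          simp at this hk
          omega
        | c :: cs => exact ⟨c, cs, rfl⟩
      have hlen1 : (h :: (b :: t').take k).length ≤ n + 1 := by
        simp at hle hk ⊢
        omega
      have hlen2 : (h2 :: t2).length ≤ n + 1 := by
        have := congrArg List.length hdrop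
        simp at this hk hle ⊢
        omega
      rw [htake, hdrop, ih h ((b :: t').take k) hlen1, ih h2 t2 hlen2]
      have hsplit : b :: t' = (b :: t').take k ++ (h2 :: t2) := by
        have h0 := List.take_append_drop ((h :: b :: t').length / 2) (h :: b :: t')
        rw [htake, hdrop] at h0
        simpa using h0.symm
      conv_rhs => rw [hsplit]
      rw [pvMinE_append, pvMaxE_append, pvMinE_cons_merge, pvMaxE_cons_merge]
      simp only [Prod.mk.injEq]
      exact ⟨by split_ifs <;> first | rfl | omega, trivial⟩

theorem pvRec_eq (h : List (String × Int)) (t : List (List (String × Int))) :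
    pvRec (h :: t) = (pvMinE h t, pvMaxE h t) := by
  unfold pvRec
  exact pvRecGo_eq (h :: t).length h t (by simp)

-- ===== VERDICT (by name: the statement is the Claim_ definition above) =====
theorem youngest_oldest_disk_spec : Claim_equal_youngest_oldest_disk := by
  intro data_list _ hpre
  unfold Spec_youngest_oldest_disk
  rcases hpre with hlen | hall
  · match data_list, hlen with
    | [], _ => rfl
    | [x], _ =>
      simp [youngest_oldest_disk, youngest_oldest_disk_alt, pvTruthy,
            pvRec_eq x [], pvMinE, pvMaxE]
  · unfold youngest_oldest_disk youngest_oldest_disk_alt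
    have hall' : ∀ x ∈ data_list, (pvLookup x).isSome = true :=
      fun x hx => pvLookup_isSome_of_mem x (hall x hx)
    rw [pvLoop_eq data_list none none hall' trivial trivial]
    cases data_list with
    | nil => rfl
    | cons h t =>
      simp only [List.foldl_cons]
      rw [optFold_min, optFold_max, pvRec_eq h t]
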